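-- pv_equiv track=rewrite | github.com/assister-xyz/quality-oracle | src/core/id_discovery.py | _looks_like_id_name
-- ===== SOURCE A (Python) =====
-- _ID_PARAM_NAMES = (
--     "id",
--     "identifier",
--     "uuid",
--     "slug",
--     "key",
-- )
--
-- def _looks_like_id_name(name: str) -> bool:
--     """Return True if `name` matches an ID-style parameter convention."""
--     n = (name or "").lower()
--     if n in _ID_PARAM_NAMES:
--         return True
--     # "coin_id", "experience_id", "session_uuid", "repo_slug"
--     for suffix in _ID_PARAM_NAMES:
--         if n.endswith("_" + suffix):
--             return True
--     return False
-- ===== SOURCE B (Python) =====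
-- _ID_PARAM_NAMES = (
--     "id",
--     "identifier",
--     "uuid",
--     "slug",
--     "key",
-- )
--
-- def _looks_like_id_name(name: str) -> bool:
--     """Return True if `name` matches an ID-style parameter convention."""
--     n = (name or "").lower()
--     return n.rpartition("_")[2] in _ID_PARAM_NAMES
-- ===== Notes on version B (the rewrite author's own statement) =====
-- stated objective: simpler
-- what changed: Instead of a membership test followed by a loop testing endswith of an underscore plus each of the five ID names, B extracts the final underscore-delimited token once with rpartition and does a single membership test on that token.
import Mathlib
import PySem

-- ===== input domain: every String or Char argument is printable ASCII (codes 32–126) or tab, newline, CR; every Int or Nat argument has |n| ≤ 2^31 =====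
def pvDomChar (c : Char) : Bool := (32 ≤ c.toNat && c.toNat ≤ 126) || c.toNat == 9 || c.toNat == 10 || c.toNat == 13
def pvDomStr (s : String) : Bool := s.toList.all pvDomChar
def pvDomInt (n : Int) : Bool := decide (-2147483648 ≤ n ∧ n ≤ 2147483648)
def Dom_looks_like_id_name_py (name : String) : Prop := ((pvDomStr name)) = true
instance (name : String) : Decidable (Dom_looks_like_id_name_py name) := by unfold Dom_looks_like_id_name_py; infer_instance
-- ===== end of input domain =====

-- B replaces A's membership test + endswith loop by extracting the final
-- underscore-delimited token once and testing it with one membership lookup (objective: simpler).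

-- ===== PORT A =====
-- the tuple _ID_PARAM_NAMES (as lowercase char lists; both ports work on List Char)
def pvIdNames : List (List Char) :=
  [['i','d'], ['i','d','e','n','t','i','f','i','e','r'], ['u','u','i','d'],
   ['s','l','u','g'], ['k','e','y']]

def looks_like_id_name_py (name : String) : Bool :=
  -- n = (name or "").lower(); '(name or "")' is the identity on a str argument
  let n : List Char := PySem.Chars.lower name.toList
  if pvIdNames.contains n then true
  else
    -- for suffix in _ID_PARAM_NAMES: if n.endswith("_" + suffix): return True
    pvIdNames.any (fun s => PySem.Chars.endswith n ('_' :: s))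

-- ===== PORT B =====
-- n.rpartition("_")[2]: the part after the LAST '_' (the whole string if no '_');
-- hand-ported (no rpartition in PySem), exact for the one-character separator "_".
def pvLastTok (n : List Char) : List Char :=
  (n.reverse.takeWhile (fun c => c ≠ '_')).reverse

def looks_like_id_name_py_alt (name : String) : Bool :=
  pvIdNames.contains (pvLastTok (PySem.Chars.lower name.toList))

-- ===== PRECONDITION & SPEC =====
def Spec_looks_like_id_name_py (name : String) (out : Bool) : Prop := out = looks_like_id_name_py_alt name
instance (name : String) (out : Bool) : Decidable (Spec_looks_like_id_name_py name out) := by unfold Spec_looks_like_id_name_py; infer_instance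

-- ===== CLAIM (what is proved, stated in full; the proofs are below) =====
def Claim_equal_looks_like_id_name_py : Prop := ∀ (name : String), Dom_looks_like_id_name_py name → Spec_looks_like_id_name_py name (looks_like_id_name_py name)

-- ===== LEMMAS AND PROOFS =====

-- the last token contains no '_'
theorem pvLastTok_no_underscore (n : List Char) : '_' ∉ pvLastTok n := by
  intro h
  simp only [pvLastTok, List.mem_reverse] at h
  have := List.mem_takeWhile_imp h
  simp at this

-- structural decomposition: either the token is the whole string (no '_' cut),
-- or '_' followed by the token is a suffix of n
theorem pvLastTok_cases (n : List Char) :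
    pvLastTok n = n ∨ ('_' :: pvLastTok n) <:+ n := by
  rcases h : n.reverse.dropWhile (fun c => c ≠ '_') with _ | ⟨c, d⟩
  · left
    have hsplit := List.takeWhile_append_dropWhile (p := fun c => c ≠ '_') (l := n.reverse)
    rw [h, List.append_nil] at hsplit
    simp only [ne_eq, decide_not] at hsplit
    simp only [pvLastTok, ne_eq, decide_not]
    rw [hsplit, List.reverse_reverse]
  · right
    have hc : c = '_' := by
      have hne : n.reverse.dropWhile (fun c => c ≠ '_') ≠ [] := by rw [h]; simp
      have := List.head_dropWhile_not (p := fun c => c ≠ '_') (l := n.reverse) hne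
      simp only [ne_eq, decide_not] at h
      simpa [h] using this
    have hsplit := List.takeWhile_append_dropWhile (p := fun c => c ≠ '_') (l := n.reverse)
    rw [h, hc] at hsplit
    refine ⟨d.reverse, ?_⟩
    have h2 := congrArg List.reverse hsplit
    simp only [ne_eq, decide_not] at h2
    simp only [pvLastTok, ne_eq, decide_not]
    simpa using h2

-- appending '_' and an underscore-free s makes s the last token
theorem pvLastTok_append (a s : List Char) (hs : '_' ∉ s) :
    pvLastTok (a ++ '_' :: s) = s := by
  have h2 : (s.reverse ++ '_' :: a.reverse).takeWhile (fun c => c ≠ '_') = s.reverse := by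
    rw [List.takeWhile_append_of_pos]
    · simp
    · intro x hx
      simp only [List.mem_reverse] at hx
      simp only [ne_eq, decide_eq_true_eq]
      rintro rfl; exact hs hx
  simp only [ne_eq, decide_not] at h2
  have h1 : (a ++ '_' :: s).reverse = s.reverse ++ '_' :: a.reverse := by simp
  simp only [pvLastTok, ne_eq, decide_not]
  rw [h1, h2, List.reverse_reverse]

-- core equality of the two algorithms, over an arbitrary char list
theorem pv_main (n : List Char) :
    (if pvIdNames.contains n then true
     else pvIdNames.any (fun s => PySem.Chars.endswith n ('_' :: s)))
    = pvIdNames.contains (pvLastTok n) := by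
  rcases pvLastTok_cases n with heq | hsuf
  · -- token = whole string, hence '_' ∉ n and no "_"+s is a suffix of n
    have hno : '_' ∉ n := heq ▸ pvLastTok_no_underscore n
    have hany : pvIdNames.any (fun s => PySem.Chars.endswith n ('_' :: s)) = false := by
      simp only [List.any_eq_false]
      intro s _
      rw [PySem.Chars.endswith_iff]
      rintro ⟨a, rfl⟩
      exact hno (by simp)
    rw [heq, hany]
    cases h : pvIdNames.contains n
    · simp [h]
    · simp
  · -- n = a ++ '_' :: pvLastTok n
    obtain ⟨a, ha⟩ := hsuf
    have hmem : '_' ∈ n := by rw [← ha]; simp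
    have hnot : pvIdNames.contains n = false := by
      simp only [List.contains_eq_mem, decide_eq_false_iff_not]
      intro hn
      fin_cases hn <;> simp_all
    have hEW : ∀ s, '_' ∉ s →
        (PySem.Chars.endswith n ('_' :: s) = true ↔ pvLastTok n = s) := by
      intro s hs
      rw [PySem.Chars.endswith_iff]
      constructor
      · rintro ⟨b, rfl⟩; exact pvLastTok_append b s hs
      · rintro rfl; exact ⟨a, ha⟩
    rw [hnot, if_neg (by simp)]
    rw [Bool.eq_iff_iff]
    simp only [List.any_eq_true, List.contains_eq_mem, decide_eq_true_eq]
    constructor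
    · rintro ⟨s, hsmem, h⟩
      have hs : '_' ∉ s := by fin_cases hsmem <;> decide
      rw [(hEW s hs).mp h]; exact hsmem
    · intro hm
      exact ⟨_, hm, (hEW _ (pvLastTok_no_underscore n)).mpr rfl⟩

-- ===== VERDICT (by name: the statement is the Claim_ definition above) =====
theorem looks_like_id_name_py_spec : Claim_equal_looks_like_id_name_py := by
  intro name _
  unfold Spec_looks_like_id_name_py looks_like_id_name_py looks_like_id_name_py_alt
  exact pv_main _
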